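-- pv_equiv track=rewrite | github.com/programiranje3/p3-2024v | lab1/lab1.py | list_stats
-- ===== SOURCE A (Python) =====
-- def list_stats(numbers):
--     min_elem = max_elem = numbers[0]
--     sum_non_neg = 0
--     prod_neg = 1
--     for number in numbers:
--         if abs(number) < abs(min_elem):
--             min_elem = number
--         elif abs(number) > abs(max_elem):
--             max_elem = number
--         if number >= 0:
--             sum_non_neg += number
--         else:
--             prod_neg *= number
--     return min_elem, max_elem, sum_non_neg, prod_neg
-- ===== SOURCE B (Python) =====
-- def list_stats(numbers):
--     min_elem = min(numbers, key=abs)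
--     max_elem = max(numbers, key=abs)
--     sum_non_neg = sum(n for n in numbers if n >= 0)
--     prod_neg = 1
--     for n in numbers:
--         if n < 0:
--             prod_neg *= n
--     return min_elem, max_elem, sum_non_neg, prod_neg
-- ===== Notes on version B (the rewrite author's own statement) =====
-- stated objective: simpler
-- what changed: The single fused loop with a coupled if/elif min-max state machine is replaced by independent passes: min/max builtins with key=abs, a filtered sum of the non-negatives, and a small product loop over the negatives.
import Mathlib
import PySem

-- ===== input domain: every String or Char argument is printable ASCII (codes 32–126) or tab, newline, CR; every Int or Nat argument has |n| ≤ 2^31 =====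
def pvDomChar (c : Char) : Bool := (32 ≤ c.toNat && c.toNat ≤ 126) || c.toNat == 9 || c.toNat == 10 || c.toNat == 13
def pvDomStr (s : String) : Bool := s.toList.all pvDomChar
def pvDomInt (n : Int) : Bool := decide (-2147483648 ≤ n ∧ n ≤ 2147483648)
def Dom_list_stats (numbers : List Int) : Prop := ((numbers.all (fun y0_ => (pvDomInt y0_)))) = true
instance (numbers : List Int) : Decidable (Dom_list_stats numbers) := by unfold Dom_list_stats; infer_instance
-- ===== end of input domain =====

-- B replaces A's fused loop by independent passes (min/max by abs, filtered sum, product of negatives); objective: simpler.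

-- ===== PORT A =====
-- one iteration of A's loop body over the state (min_elem, max_elem, sum_non_neg, prod_neg)
def listStatsStep (st : Int × Int × Int × Int) (number : Int) : Int × Int × Int × Int :=
  let mn := st.1
  let mx := st.2.1
  let s := st.2.2.1
  let p := st.2.2.2
  let mm := if |number| < |mn| then (number, mx)
            else if |number| > |mx| then (mn, number)
            else (mn, mx)
  if number ≥ 0 then (mm.1, mm.2, s + number, p)
  else (mm.1, mm.2, s, p * number)

def list_stats (numbers : List Int) : Int × Int × Int × Int :=
  match PySem.List.pyGet? numbers 0 with
  | none => (0, 0, 0, 0)   -- IndexError in Python; excluded by Pre_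
  | some h => numbers.foldl listStatsStep (h, h, 0, 1)

-- ===== PORT B =====
def list_stats_alt (numbers : List Int) : Int × Int × Int × Int :=
  match PySem.List.min? numbers (fun n => |n|), PySem.List.max? numbers (fun n => |n|) with
  | some mn, some mx =>
      let s := (numbers.filter (fun n => decide ((0:Int) ≤ n))).sum
      let p := numbers.foldl (fun acc n => if n < 0 then acc * n else acc) 1
      (mn, mx, s, p)
  | _, _ => (0, 0, 0, 0)   -- ValueError in Python; excluded by Pre_

-- ===== PRECONDITION & SPEC =====
-- A raises IndexError on the empty list (and B's min() raises ValueError); everything else is accepted.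
def Pre_list_stats (numbers : List Int) : Prop := numbers ≠ []
instance (numbers : List Int) : Decidable (Pre_list_stats numbers) := by unfold Pre_list_stats; infer_instance
def pvWitness_list_stats : List Int := [1, -2, 3]

def Spec_list_stats (numbers : List Int) (out : Int × Int × Int × Int) : Prop := out = list_stats_alt numbers
instance (numbers : List Int) (out : Int × Int × Int × Int) : Decidable (Spec_list_stats numbers out) := by unfold Spec_list_stats; infer_instance

-- ===== CLAIM (what is proved, stated in full; the proofs are below) =====
def Claim_equal_list_stats : Prop := ∀ (numbers : List Int), Dom_list_stats numbers → Pre_list_stats numbers → Spec_list_stats numbers (list_stats numbers)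

-- ===== LEMMAS AND PROOFS =====

theorem min?_abs_cons (h : Int) (t : List Int) :
    PySem.List.min? (h :: t) (fun n => |n|)
    = some (t.foldl (fun m n => if |n| < |m| then n else m) h) := by
  induction t generalizing h with
  | nil => rfl
  | cons n t ih =>
      have step : PySem.List.min? (h :: n :: t) (fun n => |n|)
          = PySem.List.min? ((if |n| < |h| then n else h) :: t) (fun n => |n|) := by
        unfold PySem.List.min?
        simp only [List.foldl_cons]
        congr 1
        split_ifs <;> rfl
      rw [step, ih, List.foldl_cons]

theorem max?_abs_cons (h : Int) (t : List Int) :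
    PySem.List.max? (h :: t) (fun n => |n|)
    = some (t.foldl (fun m n => if |m| < |n| then n else m) h) := by
  induction t generalizing h with
  | nil => rfl
  | cons n t ih =>
      have step : PySem.List.max? (h :: n :: t) (fun n => |n|)
          = PySem.List.max? ((if |h| < |n| then n else h) :: t) (fun n => |n|) := by
        unfold PySem.List.max?
        simp only [List.foldl_cons]
        congr 1
        split_ifs <;> rfl
      rw [step, ih, List.foldl_cons]

theorem prodFold_mul (t : List Int) (a : Int) :
    t.foldl (fun acc n => if n < 0 then acc * n else acc) a
    = a * t.foldl (fun acc n => if n < 0 then acc * n else acc) 1 := by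
  induction t generalizing a with
  | nil => simp
  | cons n t ih =>
      simp only [List.foldl_cons]
      rw [ih, ih (if n < 0 then 1 * n else 1)]
      split_ifs <;> ring

-- the heart: A's fused loop, from a state with |mn| <= |mx|, decomposes into four independent passes
theorem main_decomp (t : List Int) (mn mx s p : Int) (h : |mn| <= |mx|) :
    t.foldl listStatsStep (mn, mx, s, p)
    = (t.foldl (fun m n => if |n| < |m| then n else m) mn,
       t.foldl (fun m n => if |m| < |n| then n else m) mx,
       s + (t.filter (fun n => decide ((0:Int) <= n))).sum,
       p * t.foldl (fun acc n => if n < 0 then acc * n else acc) 1) := by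
  induction t generalizing mn mx s p with
  | nil => simp
  | cons n t ih =>
      simp only [List.foldl_cons, List.filter_cons]
      rw [prodFold_mul t (if n < 0 then 1 * n else 1)]
      have hstep : listStatsStep (mn, mx, s, p) n
          = ((if |n| < |mn| then n else mn),
             (if |n| < |mn| then mx else if |mx| < |n| then n else mx),
             (if n >= 0 then s + n else s),
             (if n >= 0 then p else p * n)) := by
        simp only [listStatsStep, gt_iff_lt]
        split_ifs <;> rfl
      rw [hstep, ih _ _ _ _ ?_]
      · have e2 : (if |n| < |mn| then mx else if |mx| < |n| then n else mx)
            = (if |mx| < |n| then n else mx) := by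
          split_ifs <;> first | rfl | omega
        rw [e2]
        by_cases hc : (0:Int) <= n
        · simp [hc, show ¬ n < 0 by omega, Prod.mk.injEq]
          omega
        · simp [hc, show n < 0 by omega, Prod.mk.injEq]
          ring
      · split_ifs <;> omega

-- ===== VERDICT (by name: the statement is the Claim_ definition above) =====
theorem list_stats_spec : Claim_equal_list_stats := by
  intro numbers _ hpre
  unfold Spec_list_stats
  match numbers, hpre with
  | h :: t, _ =>
    unfold list_stats list_stats_alt
    rw [show PySem.List.pyGet? (h :: t) 0 = some h by simp [PySem.List.pyGet?, PySem.List.pyIdx?]]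
    rw [min?_abs_cons, max?_abs_cons]
    simp only [List.foldl_cons, List.filter_cons]
    rw [prodFold_mul t (if h < 0 then 1 * h else 1)]
    have hstep : listStatsStep (h, h, 0, 1) h
        = (h, h, (if h >= 0 then (0:Int) + h else 0), (if h >= 0 then (1:Int) else 1 * h)) := by
      simp only [listStatsStep, gt_iff_lt]
      split_ifs <;> rfl
    rw [hstep, main_decomp t h h _ _ (le_refl _)]
    by_cases hc : (0:Int) <= h
    · simp [hc, show ¬ h < 0 by omega]
    · simp [hc, show h < 0 by omega]
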